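-- pv_equiv track=rewrite | github.com/sligara7/dnd_creator | backend7/core/utils/mechanical_parser.py | normalize_ability_dict
-- ===== SOURCE A (Python) =====
-- from typing import Dict, List, Tuple, Optional, Any, Union
--
-- def normalize_ability_dict(ability_dict: Dict[str, int]) -> Dict[str, int]:
--     """Normalize ability score dictionary - crude_functional.py standardization."""
--     if not ability_dict:
--         return get_default_ability_scores()
--
--     # Standard ability score names
--     standard_abilities = ["strength", "dexterity", "constitution", "intelligence", "wisdom", "charisma"]
--
--     normalized = {}
--     for ability in standard_abilities:
--         # Try various name formats
--         value = None
--         for key in ability_dict: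
--             key_lower = key.lower().strip()
--             if key_lower == ability or key_lower == ability[:3]:  # STR, DEX, etc.
--                 value = ability_dict[key]
--                 break
--
--         # Default to 10 if not found
--         normalized[ability] = max(1, min(20, int(value) if value is not None else 10))
--
--     return normalized
--
-- def get_default_ability_scores() -> Dict[str, int]:
--     """Get default ability scores - crude_functional.py safe defaults."""
--     return {
--         "strength": 10,
--         "dexterity": 10,
--         "constitution": 10,
--         "intelligence": 10,
--         "wisdom": 10,
--         "charisma": 10
--     }
-- ===== SOURCE B (Python) =====
-- def normalize_ability_dict(ability_dict):
--     """Normalize ability score dictionary - single pass over the input."""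
--     abilities = ["strength", "dexterity", "constitution", "intelligence", "wisdom", "charisma"]
--     # index: every accepted spelling -> standard ability name
--     names = {}
--     for a in abilities:
--         names[a] = a
--         names[a[:3]] = a
--     # one pass over the input; first match per ability wins (iteration order)
--     found = {}
--     for key, value in ability_dict.items():
--         a = names.get(key.lower().strip())
--         if a is not None and a not in found:
--             found[a] = value
--     return {a: max(1, min(20, int(found.get(a, 10)))) for a in abilities}
-- ===== Notes on version B (the rewrite author's own statement) =====
-- stated objective: faster
-- what changed: Instead of scanning the whole dict once per standard ability (6 passes with an inner break), B builds a spelling->ability index once and makes a single first-wins pass over the input, then reads the 6 abilities out of the collected table.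
import Mathlib
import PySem

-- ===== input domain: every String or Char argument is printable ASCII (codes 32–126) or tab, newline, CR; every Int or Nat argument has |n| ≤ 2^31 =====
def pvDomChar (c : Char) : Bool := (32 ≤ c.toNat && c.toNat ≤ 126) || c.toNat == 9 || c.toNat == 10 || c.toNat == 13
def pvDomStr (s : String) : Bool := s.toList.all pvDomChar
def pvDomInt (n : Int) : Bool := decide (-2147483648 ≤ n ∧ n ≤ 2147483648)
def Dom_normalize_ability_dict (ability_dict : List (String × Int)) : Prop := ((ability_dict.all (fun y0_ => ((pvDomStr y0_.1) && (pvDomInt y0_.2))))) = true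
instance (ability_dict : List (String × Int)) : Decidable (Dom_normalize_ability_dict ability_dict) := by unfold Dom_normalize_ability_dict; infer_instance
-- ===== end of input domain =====

-- B replaces A's six scans of the input (one per standard ability) by a spelling->ability
-- index built once and a single first-wins pass over the input; objective: faster (constant factor).

-- ===== PORT A =====
-- standard_abilities
def pvAbilities : List String :=
  ["strength", "dexterity", "constitution", "intelligence", "wisdom", "charisma"]

-- A's inner 'for key in ability_dict: … break' loop: value of the first matching key
def pvFindA (pairs : List (String × Int)) (ability : String) : Option Int :=
  match pairs with
  | [] => none
  | (k, v) :: rest =>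
    let key_lower := PySem.Str.strip (PySem.Str.lower k)
    if key_lower == ability || key_lower == PySem.Str.slice ability none (some 3) then
      some v
    else
      pvFindA rest ability

def normalize_ability_dict (ability_dict : List (String × Int)) : List (String × Int) :=
  if ability_dict.isEmpty then
    -- get_default_ability_scores()
    [("strength", 10), ("dexterity", 10), ("constitution", 10),
     ("intelligence", 10), ("wisdom", 10), ("charisma", 10)]
  else
    (pvAbilities.foldl
      (fun normalized ability =>
        normalized.insert ability
          (max 1 (min 20 ((pvFindA ability_dict ability).getD 10))))
      (PySem.Dict.empty : PySem.Dict String Int)).items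

-- ===== PORT B =====
-- names: every accepted spelling -> standard ability name  (Source B's first loop)
def pvNames : PySem.Dict String String :=
  pvAbilities.foldl
    (fun names a =>
      (names.insert a a).insert (PySem.Str.slice a none (some 3)) a)
    PySem.Dict.empty

-- the body of Source B's 'for key, value in ability_dict.items()' loop
def pvStep (found : PySem.Dict String Int) (kv : String × Int) : PySem.Dict String Int :=
  match pvNames.get? (PySem.Str.strip (PySem.Str.lower kv.1)) with
  | some a => if found.contains a then found else found.insert a kv.2
  | none => found

-- B's single first-wins pass over the input
def pvFound (ability_dict : List (String × Int)) : PySem.Dict String Int :=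
  ability_dict.foldl pvStep PySem.Dict.empty

def normalize_ability_dict_alt (ability_dict : List (String × Int)) : List (String × Int) :=
  pvAbilities.map (fun a => (a, max 1 (min 20 ((pvFound ability_dict).getD a 10))))

-- ===== PRECONDITION & SPEC =====
def Spec_normalize_ability_dict (ability_dict : List (String × Int)) (out : List (String × Int)) : Prop := out = normalize_ability_dict_alt ability_dict
instance (ability_dict : List (String × Int)) (out : List (String × Int)) : Decidable (Spec_normalize_ability_dict ability_dict out) := by unfold Spec_normalize_ability_dict; infer_instance

-- ===== CLAIM (what is proved, stated in full; the proofs are below) =====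
def Claim_equal_normalize_ability_dict : Prop := ∀ (ability_dict : List (String × Int)), Dom_normalize_ability_dict ability_dict → Spec_normalize_ability_dict ability_dict (normalize_ability_dict ability_dict)

-- ===== LEMMAS AND PROOFS =====

-- B's scan restricted to one ability, as a first-match search (proof-side helper)
def pvSel (ability : String) (kv : String × Int) : Option Int :=
  match pvNames.get? (PySem.Str.strip (PySem.Str.lower kv.1)) with
  | some a => if a == ability then some kv.2 else none
  | none => none

def pvFindB (pairs : List (String × Int)) (ability : String) : Option Int :=
  pairs.findSome? (pvSel ability)

theorem pvFindB_cons (kv : String × Int) (rest : List (String × Int)) (ability : String) :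
    pvFindB (kv :: rest) ability =
      match pvSel ability kv with
      | some b => some b
      | none => pvFindB rest ability := by
  cases hc : pvSel ability kv with
  | none => unfold pvFindB; rw [List.findSome?_cons, hc]
  | some b => unfold pvFindB; rw [List.findSome?_cons, hc]

theorem pvSel_none (kv : String × Int) (ability : String)
    (h : pvNames.get? (PySem.Str.strip (PySem.Str.lower kv.1)) = none) :
    pvSel ability kv = none := by unfold pvSel; rw [h]

theorem pvSel_some (kv : String × Int) (a ability : String)
    (h : pvNames.get? (PySem.Str.strip (PySem.Str.lower kv.1)) = some a) :
    pvSel ability kv = if a == ability then some kv.2 else none := by unfold pvSel; rw [h]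

theorem pvStep_none (g : PySem.Dict String Int) (kv : String × Int)
    (h : pvNames.get? (PySem.Str.strip (PySem.Str.lower kv.1)) = none) :
    pvStep g kv = g := by unfold pvStep; rw [h]

theorem pvStep_some (g : PySem.Dict String Int) (kv : String × Int) (a : String)
    (h : pvNames.get? (PySem.Str.strip (PySem.Str.lower kv.1)) = some a) :
    pvStep g kv = if g.contains a then g else g.insert a kv.2 := by unfold pvStep; rw [h]

-- pvNames classifies a normalized key exactly as A's two comparisons do
theorem pvNames_get?_eq (a : String) (ha : a ∈ pvAbilities) (s : String) :
    (pvNames.get? s = some a) ↔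
      (s == a || s == PySem.Str.slice a none (some 3)) = true := by
  simp only [pvAbilities, List.mem_cons, List.not_mem_nil, or_false] at ha
  rcases ha with h | h | h | h | h | h <;> subst h <;>
    (constructor
     · intro hg
       have hs : s ∈ pvNames.keys := by
         by_contra hmem
         rw [(PySem.Dict.get?_eq_none_iff_not_mem_keys _ _).mpr hmem] at hg
         simp at hg
       rw [show pvNames.keys = ["strength", "str", "dexterity", "dex", "constitution", "con",
         "intelligence", "int", "wisdom", "wis", "charisma", "cha"] from rfl] at hs
       simp only [List.mem_cons, List.not_mem_nil, or_false] at hs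
       rcases hs with rfl|rfl|rfl|rfl|rfl|rfl|rfl|rfl|rfl|rfl|rfl|rfl <;>
         revert hg <;> decide
     · intro hb
       simp only [Bool.or_eq_true, beq_iff_eq] at hb
       rcases hb with rfl | rfl <;> decide)

-- the value stored for `ability` by B's pass, relative to an arbitrary accumulator
theorem pvFound_get? (pairs : List (String × Int)) (f : PySem.Dict String Int)
    (ability : String) :
    (pairs.foldl pvStep f).get? ability =
      if f.contains ability then f.get? ability else pvFindB pairs ability := by
  induction pairs generalizing f with
  | nil =>
    simp only [List.foldl_nil, pvFindB, List.findSome?_nil]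
    split_ifs with h
    · rfl
    · exact (PySem.Dict.get?_eq_none_iff_contains f ability).mpr (by simpa using h)
  | cons kv rest ih =>
    rw [List.foldl_cons, pvFindB_cons]
    cases hc : pvNames.get? (PySem.Str.strip (PySem.Str.lower kv.1)) with
    | none => rw [pvSel_none kv ability hc, pvStep_none f kv hc, ih f]
    | some a =>
      rw [pvSel_some kv a ability hc, pvStep_some f kv a hc]
      by_cases hab : a = ability
      · subst hab
        rw [if_pos (beq_self_eq_true a)]
        by_cases hfa : f.contains a = true
        · rw [if_pos hfa, ih f, if_pos hfa, if_pos hfa]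
        · simp only [Bool.not_eq_true] at hfa
          rw [hfa, if_neg (by simp), ih (f.insert a kv.2),
            if_pos (PySem.Dict.contains_insert_self f a kv.2),
            PySem.Dict.get?_insert_self, if_neg (by simp)]
      · rw [show (a == ability) = false from beq_eq_false_iff_ne.mpr hab]
        simp only [Bool.false_eq_true, if_false]
        have hcont : (if f.contains a = true then f else f.insert a kv.2).contains ability
            = f.contains ability := by
          split_ifs
          · rfl
          · simp [PySem.Dict.contains_insert, beq_eq_false_iff_ne.mpr (Ne.symm hab)]
        have hg : (if f.contains a = true then f else f.insert a kv.2).get? ability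
            = f.get? ability := by
          split_ifs
          · rfl
          · exact PySem.Dict.get?_insert_of_ne f kv.2 (Ne.symm hab)
        rw [ih (if f.contains a = true then f else f.insert a kv.2), hcont, hg]

-- B's first-match search is A's inner scan, for a standard ability
theorem pvFindB_eq_pvFindA (pairs : List (String × Int)) (a : String)
    (ha : a ∈ pvAbilities) : pvFindB pairs a = pvFindA pairs a := by
  induction pairs with
  | nil => rfl
  | cons kv rest ih =>
    obtain ⟨k, v⟩ := kv
    rw [pvFindB_cons]
    show _ = pvFindA ((k, v) :: rest) a
    rw [pvFindA]
    by_cases hm : ((PySem.Str.strip (PySem.Str.lower k)) == a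
        || (PySem.Str.strip (PySem.Str.lower k)) == PySem.Str.slice a none (some 3)) = true
    · rw [if_pos hm]
      have hc : pvNames.get? (PySem.Str.strip (PySem.Str.lower k)) = some a :=
        (pvNames_get?_eq a ha _).mpr hm
      rw [pvSel_some (k, v) a a hc, if_pos (beq_self_eq_true a)]
    · rw [if_neg hm]
      cases hc : pvNames.get? (PySem.Str.strip (PySem.Str.lower k)) with
      | none => rw [pvSel_none (k, v) a hc, ih]
      | some a' =>
        have hne : a' ≠ a := fun h => hm ((pvNames_get?_eq a ha _).mp (h ▸ hc))
        rw [pvSel_some (k, v) a' a hc,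
          show (a' == a) = false from beq_eq_false_iff_ne.mpr hne]
        simp only [Bool.false_eq_true, if_false]
        rw [ih]

-- B's table lookup agrees with A's inner scan, ability by ability
theorem alt_value (ability_dict : List (String × Int)) (a : String) (ha : a ∈ pvAbilities) :
    (pvFound ability_dict).getD a 10 = (pvFindA ability_dict a).getD 10 := by
  rw [PySem.Dict.getD_eq_get?_getD]
  unfold pvFound
  rw [pvFound_get? ability_dict PySem.Dict.empty a]
  simp [PySem.Dict.contains_empty, pvFindB_eq_pvFindA ability_dict a ha]

-- ===== VERDICT (by name: the statement is the Claim_ definition above) =====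
theorem normalize_ability_dict_spec : Claim_equal_normalize_ability_dict := by
  intro d _
  show normalize_ability_dict d = normalize_ability_dict_alt d
  by_cases hd : d = []
  · subst hd; decide
  · unfold normalize_ability_dict normalize_ability_dict_alt
    rw [if_neg (by simpa using hd)]
    rw [PySem.Dict.items_foldl_insert_fresh (k := fun a => a)
      (v := fun ability => max 1 (min 20 ((pvFindA d ability).getD 10)))
      (l := pvAbilities) (d := PySem.Dict.empty)
      (fun a _ => PySem.Dict.contains_empty a) (by decide)]
    simp only [PySem.Dict.empty, List.nil_append]
    exact (List.map_congr_left fun a ha => by rw [alt_value d a ha]).symm
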